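-- pv_equiv track=rewrite | github.com/olivierfriard/BORIS | transitions.py | behavioral_strings_analysis
-- ===== SOURCE A (Python) =====
-- def behavioral_strings_analysis(strings, behaviouralStringsSeparator):
--     """
--     Analyze behavioral strings
--     """
--
--     rows = strings[:]
--
--     sequences = []
--
--     for row in rows:
--
--         if behaviouralStringsSeparator:
--             r = row.strip().split(behaviouralStringsSeparator)
--         else:
--             r = list(row.strip())
--
--         sequences.append(r)
--
--     # extract unique behaviors
--     unique_behaviors = []
--     for seq in sequences:
--         for c in seq:
--             if not c in unique_behaviors:
--                 unique_behaviors.append(c)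
--
--     unique_behaviors.sort()
--
--     return sequences, unique_behaviors
-- ===== SOURCE B (Python) =====
-- def behavioral_strings_analysis(strings, behaviouralStringsSeparator):
--     """
--     Analyze behavioral strings
--     """
--
--     if behaviouralStringsSeparator:
--         sequences = [row.strip().split(behaviouralStringsSeparator) for row in strings]
--     else:
--         sequences = [list(row.strip()) for row in strings]
--
--     # sort all tokens once, then drop adjacent duplicates in one linear pass
--     all_tokens = [token for seq in sequences for token in seq]
--     all_tokens.sort()
--
--     unique_behaviors = []
--     prev = None
--     for token in all_tokens:
--         if prev is None or token != prev:
--             unique_behaviors.append(token)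
--             prev = token
--
--     return sequences, unique_behaviors
-- ===== Notes on version B (the rewrite author's own statement) =====
-- stated objective: faster
-- what changed: Phase 2 replaces the first-occurrence dedup (a linear membership scan of the growing unique list for every token) followed by a sort with: sort the flat token list once, then remove adjacent duplicates in a single linear pass.
import Mathlib
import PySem

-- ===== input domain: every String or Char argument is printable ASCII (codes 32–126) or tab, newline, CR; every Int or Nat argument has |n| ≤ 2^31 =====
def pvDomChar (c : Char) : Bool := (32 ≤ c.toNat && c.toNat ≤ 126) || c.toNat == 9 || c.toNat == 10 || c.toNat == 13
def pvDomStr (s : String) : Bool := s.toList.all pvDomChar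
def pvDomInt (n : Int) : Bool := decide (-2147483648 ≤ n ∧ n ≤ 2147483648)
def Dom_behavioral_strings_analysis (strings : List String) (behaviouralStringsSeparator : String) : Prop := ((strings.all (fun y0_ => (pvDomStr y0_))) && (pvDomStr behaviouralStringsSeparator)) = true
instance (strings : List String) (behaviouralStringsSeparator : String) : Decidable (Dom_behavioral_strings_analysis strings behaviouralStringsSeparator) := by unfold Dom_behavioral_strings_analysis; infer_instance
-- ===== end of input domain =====

-- B sorts the flat token list once and removes adjacent duplicates in one pass, instead of A's
-- per-token membership scan of the growing unique list followed by a sort.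


-- ===== PORT A =====
-- 'row.strip().split(sep)' with sep ≠ "" never raises; the 'none => []' arm of split? is unreachable.
def behavioral_strings_analysis (strings : List String) (behaviouralStringsSeparator : String) : List (List String) × List String :=
  let rows := strings
  let sequences := rows.foldl (fun acc row =>
    let r := if behaviouralStringsSeparator ≠ "" then
        match PySem.Str.split? (PySem.Str.strip row) behaviouralStringsSeparator with
        | some l => l
        | none => []
      else
        (PySem.Str.strip row).toList.map (fun c => String.ofList [c])
    acc ++ [r]) []
  let unique_behaviors := sequences.foldl (fun acc seq =>
    seq.foldl (fun acc2 c => if ¬ (c ∈ acc2) then acc2 ++ [c] else acc2) acc) []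
  (sequences, PySem.List.sorted unique_behaviors (fun x => x) false)

-- ===== PORT B =====
def behavioral_strings_analysis_alt (strings : List String) (behaviouralStringsSeparator : String) : List (List String) × List String :=
  let sequences :=
    if behaviouralStringsSeparator ≠ "" then
      strings.map (fun row =>
        match PySem.Str.split? (PySem.Str.strip row) behaviouralStringsSeparator with
        | some l => l
        | none => [])
    else
      strings.map (fun row => (PySem.Str.strip row).toList.map (fun c => String.ofList [c]))
  let all_tokens := sequences.flatMap (fun seq => seq)
  let sorted_tokens := PySem.List.sorted all_tokens (fun x => x) false
  let st := sorted_tokens.foldl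
    (fun (s : List String × Option String) token =>
      if some token ≠ s.2 then (s.1 ++ [token], some token) else s)
    ([], none)
  (sequences, st.1)

-- ===== PRECONDITION & SPEC =====
def Spec_behavioral_strings_analysis (strings : List String) (behaviouralStringsSeparator : String) (out : List (List String) × List String) : Prop := out = behavioral_strings_analysis_alt strings behaviouralStringsSeparator
instance (strings : List String) (behaviouralStringsSeparator : String) (out : List (List String) × List String) : Decidable (Spec_behavioral_strings_analysis strings behaviouralStringsSeparator out) := by unfold Spec_behavioral_strings_analysis; infer_instance

-- ===== CLAIM (what is proved, stated in full; the proofs are below) =====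
def Claim_equal_behavioral_strings_analysis : Prop := ∀ (strings : List String) (behaviouralStringsSeparator : String), Dom_behavioral_strings_analysis strings behaviouralStringsSeparator → Spec_behavioral_strings_analysis strings behaviouralStringsSeparator (behavioral_strings_analysis strings behaviouralStringsSeparator)

-- ===== LEMMAS AND PROOFS =====

-- structural form of B's adjacent-duplicate-removal loop
def adjDedup (ys : List String) (p : Option String) : List String :=
  match ys with
  | [] => []
  | y :: t => if some y ≠ p then y :: adjDedup t (some y) else adjDedup t p

theorem adjDedup_cons_eq (y : String) (t : List String) (p : Option String) (h : some y = p) :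
    adjDedup (y :: t) p = adjDedup t p := by
  simp [adjDedup, h]

theorem adjDedup_cons_ne (y : String) (t : List String) (p : Option String) (h : ¬ some y = p) :
    adjDedup (y :: t) p = y :: adjDedup t (some y) := by
  simp [adjDedup, h]

theorem foldl_adjDedup (ys : List String) (acc : List String) (p : Option String) :
    (ys.foldl
      (fun (s : List String × Option String) token =>
        if some token ≠ s.2 then (s.1 ++ [token], some token) else s)
      (acc, p)).1 = acc ++ adjDedup ys p := by
  induction ys generalizing acc p with
  | nil => simp [adjDedup]
  | cons y t ih =>
    rw [List.foldl_cons]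
    by_cases h : some y = p
    · rw [if_neg (not_not_intro h), adjDedup_cons_eq y t p h]
      exact ih acc p
    · rw [if_pos h, adjDedup_cons_ne y t p h, ih (acc ++ [y]) (some y), List.append_assoc]
      rfl

theorem adjDedup_some_props (ys : List String) (q : String)
    (hp : ys.Pairwise (· ≤ ·)) (hb : ∀ a ∈ ys, q ≤ a) :
    (adjDedup ys (some q)).Pairwise (· < ·) ∧
      (∀ b ∈ adjDedup ys (some q), q < b) ∧
      (∀ x, x ∈ adjDedup ys (some q) ↔ (x ∈ ys ∧ x ≠ q)) := by
  induction ys generalizing q with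
  | nil => simp [adjDedup]
  | cons y t ih =>
    have hpt : t.Pairwise (· ≤ ·) := hp.tail
    have hyt : ∀ a ∈ t, y ≤ a := fun a ha => (List.pairwise_cons.mp hp).1 a ha
    by_cases h : y = q
    · subst h
      rw [adjDedup_cons_eq y t (some y) rfl]
      obtain ⟨h1, h2, h3⟩ := ih y hpt hyt
      refine ⟨h1, h2, fun x => ?_⟩
      rw [h3 x, List.mem_cons]
      constructor
      · rintro ⟨hx, hne⟩; exact ⟨Or.inr hx, hne⟩
      · rintro ⟨hx | hx, hne⟩
        · exact absurd hx hne
        · exact ⟨hx, hne⟩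
    · have hqy : q < y := lt_of_le_of_ne (hb y List.mem_cons_self) (fun e => h e.symm)
      rw [adjDedup_cons_ne y t (some q) (by simpa using h)]
      obtain ⟨h1, h2, h3⟩ := ih y hpt hyt
      refine ⟨?_, ?_, ?_⟩
      · exact List.pairwise_cons.mpr ⟨fun b hb' => h2 b hb', h1⟩
      · intro b hb'
        rcases List.mem_cons.mp hb' with h1' | h1'
        · exact h1' ▸ hqy
        · exact lt_trans hqy (h2 b h1')
      · intro x
        rw [List.mem_cons, h3 x, List.mem_cons]
        constructor
        · rintro (rfl | ⟨hx, hne⟩)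
          · exact ⟨Or.inl rfl, ne_of_gt hqy⟩
          · refine ⟨Or.inr hx, fun e => ?_⟩
            exact absurd (e ▸ hyt x hx) (not_le.mpr (e ▸ hqy))
        · rintro ⟨(rfl | hx), hne⟩
          · exact Or.inl rfl
          · by_cases hxy : x = y
            · exact Or.inl hxy
            · exact Or.inr ⟨hx, hxy⟩

theorem adjDedup_none_props (ys : List String) (hp : ys.Pairwise (· ≤ ·)) :
    (adjDedup ys none).Pairwise (· < ·) ∧ (∀ x, x ∈ adjDedup ys none ↔ x ∈ ys) := by
  cases ys with
  | nil => simp [adjDedup]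
  | cons y t =>
    have hpt : t.Pairwise (· ≤ ·) := hp.tail
    have hyt : ∀ a ∈ t, y ≤ a := fun a ha => (List.pairwise_cons.mp hp).1 a ha
    obtain ⟨h1, h2, h3⟩ := adjDedup_some_props t y hpt hyt
    rw [adjDedup_cons_ne y t none (by simp)]
    constructor
    · exact List.pairwise_cons.mpr ⟨fun b hb' => h2 b hb', h1⟩
    · intro x
      rw [List.mem_cons, h3 x, List.mem_cons]
      constructor
      · rintro (rfl | ⟨hx, _⟩)
        · exact Or.inl rfl
        · exact Or.inr hx
      · rintro (rfl | hx)
        · exact Or.inl rfl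
        · by_cases hxy : x = y
          · exact Or.inl hxy
          · exact Or.inr ⟨hx, hxy⟩

-- A's first-occurrence dedup loop is PySem.List.dedup of the flat token list
theorem foldl_mem_append_eq_dedup (l : List String) :
    l.foldl (fun acc2 c => if ¬ (c ∈ acc2) then acc2 ++ [c] else acc2) [] =
      PySem.List.dedup l := by
  rw [PySem.List.dedup_eq_ofList, PySem.Set.ofList_eq_foldl]
  apply PySem.List.foldl_congr_mem
  intro acc x _
  by_cases h : x ∈ acc <;> simp [PySem.Set.add, PySem.Set.contains, h]

-- the core: sorting A's first-occurrence dedup = B's adjacent dedup of the sorted flat list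
theorem snd_components_eq (seqs : List (List String)) :
    PySem.List.sorted (seqs.foldl (fun acc seq =>
      seq.foldl (fun acc2 c => if ¬ (c ∈ acc2) then acc2 ++ [c] else acc2) acc) []) (fun x => x) false =
    ((PySem.List.sorted (seqs.flatMap (fun seq => seq)) (fun x => x) false).foldl
      (fun (s : List String × Option String) token =>
        if some token ≠ s.2 then (s.1 ++ [token], some token) else s)
      ([], none)).1 := by
  have hflat : seqs.flatMap (fun seq => seq) = seqs.flatten := by simp
  rw [hflat, foldl_adjDedup, List.nil_append, ← List.foldl_flatten,
    foldl_mem_append_eq_dedup]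
  have hsp : (PySem.List.sorted seqs.flatten (fun x => x) false).Pairwise (· ≤ ·) :=
    PySem.List.sorted_pairwise seqs.flatten (fun x => x)
  obtain ⟨hlt, hmem⟩ := adjDedup_none_props _ hsp
  apply PySem.List.sorted_eq_of_perm_of_pairwise_lt
  · rw [List.perm_ext_iff_of_nodup (hlt.imp fun h => ne_of_lt h) (PySem.List.nodup_dedup _)]
    intro a
    rw [hmem a, PySem.List.mem_sorted, PySem.List.mem_dedup]
  · exact hlt

-- ===== VERDICT (by name: the statement is the Claim_ definition above) =====
theorem behavioral_strings_analysis_spec : Claim_equal_behavioral_strings_analysis := by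
  intro strings sep _
  unfold Spec_behavioral_strings_analysis
  by_cases hs : sep = ""
  · simp only [behavioral_strings_analysis, behavioral_strings_analysis_alt, hs, ne_eq,
      not_true_eq_false, if_false]
    rw [PySem.List.foldl_append_singleton_eq_map, List.nil_append]
    exact Prod.ext rfl (snd_components_eq _)
  · simp only [behavioral_strings_analysis, behavioral_strings_analysis_alt, ne_eq, hs,
      not_false_eq_true, if_true]
    rw [PySem.List.foldl_append_singleton_eq_map, List.nil_append]
    exact Prod.ext rfl (snd_components_eq _)
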